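-- pv_equiv track=rewrite | github.com/genggng/leetcode | 828.统计子串中的唯一字符.py | uniqueLetterString
-- ===== SOURCE A (Python) =====
-- def uniqueLetterString(s: str) -> int:
--     """
--     思考每种字符对最终结果的贡献
--     每种字符在子字符串中出现一次，就能提供1点贡献
--     各种字符串提供的贡献相互独立，并不会互相影响
--     只用统计每种字符串对最终结果的贡献即可
--     """
--     index = {}
--     for i,c in enumerate(s):
--         if c not in index.keys():
--             index[c] = []
--         index[c].append(i)  #将相同字符的索引放入一个列表
--
--     res = 0
--     for arr in index.values():
--         arr = [-1] + arr + [len(s)]  #给出s数组的起始结束边界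
--         for i in range(1,len(arr)-1):
--             # arr[i] 存储的是字符arr存在的位置
--             # 对于arr 存在的三个位置i,j,k  其存在arr的子字符串有 (arr[j] - arr[i])*(arr[k] - arr[j])
--             # 即起始位置有(arr[j] - arr[i]) 种 结束位置有arr[k] - arr[j] 种可能，保证字符串中只包含一个arr
--             res += (arr[i] - arr[i-1])*(arr[i+1]-arr[i])
--     return res
-- ===== SOURCE B (Python) =====
-- def uniqueLetterString(s: str) -> int:
--     # Single forward pass: occ[c] = (second-to-last, last) occurrence of c (default -1, -1).
--     # When c reappears at i, the previous occurrence `last` stops being unique for substrings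
--     # ending at >= i, contributing (last - secondLast) * (i - last).
--     occ = {}
--     res = 0
--     for i, c in enumerate(s):
--         sl, l = occ.get(c, (-1, -1))
--         res += (l - sl) * (i - l)
--         occ[c] = (l, i)
--     n = len(s)
--     for sl, l in occ.values():
--         res += (l - sl) * (n - l)
--     return res
-- ===== Notes on version B (the rewrite author's own statement) =====
-- stated objective: faster
-- what changed: Replaces A's two-phase grouping (build a dict of per-character occurrence lists, then sum (arr[i]-arr[i-1])*(arr[i+1]-arr[i]) over each padded list) with a single forward pass keeping only each character's last and second-to-last occurrence and accumulating the contribution incrementally, plus a final flush using len(s) as right boundary; no per-character lists are materialised.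
import Mathlib
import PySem

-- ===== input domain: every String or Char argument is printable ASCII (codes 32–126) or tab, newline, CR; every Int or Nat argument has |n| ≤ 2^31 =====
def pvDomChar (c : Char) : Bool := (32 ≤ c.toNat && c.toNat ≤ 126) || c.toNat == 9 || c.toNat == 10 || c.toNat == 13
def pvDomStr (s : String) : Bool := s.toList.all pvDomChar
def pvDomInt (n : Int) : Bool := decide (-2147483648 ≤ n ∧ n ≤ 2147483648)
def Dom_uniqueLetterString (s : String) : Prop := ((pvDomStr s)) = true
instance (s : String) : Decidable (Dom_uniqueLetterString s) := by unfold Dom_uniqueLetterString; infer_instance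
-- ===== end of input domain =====

-- B replaces A's two-phase grouping (dict of per-character occurrence lists, then a padded
-- triple-product sum per list) by a single forward pass keeping each character's last two
-- occurrences and accumulating contributions incrementally; no per-character lists are built.


-- ===== PORT A =====
def uniqueLetterString (s : String) : Int :=
  let index : PySem.Dict Char (List Int) :=
    (PySem.List.enumerate s.toList).foldl
      (fun d p =>
        let d' := if d.contains p.2 then d else d.insert p.2 []   -- if c not in index.keys(): index[c] = []
        d'.modify p.2 [] (· ++ [p.1]))                            -- index[c].append(i)
      PySem.Dict.empty
  index.values.foldl
    (fun res arr0 =>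
      let arr := [(-1 : Int)] ++ arr0 ++ [PySem.Str.len s]        -- arr = [-1] + arr + [len(s)]
      (PySem.List.pyRange 1 ((arr.length : Int) - 1) 1).foldl
        (fun r i =>
          r + (PySem.List.pyGetD arr i 0 - PySem.List.pyGetD arr (i - 1) 0) *
              (PySem.List.pyGetD arr (i + 1) 0 - PySem.List.pyGetD arr i 0))
        res)
    0

-- ===== PORT B =====
def uniqueLetterString_alt (s : String) : Int :=
  let st :=
    (PySem.List.enumerate s.toList).foldl
      (fun (st : PySem.Dict Char (Int × Int) × Int) p =>
        let q := st.1.getD p.2 (-1, -1)                            -- sl, l = occ.get(c, (-1, -1))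
        (st.1.insert p.2 (q.2, p.1), st.2 + (q.2 - q.1) * (p.1 - q.2)))
      (PySem.Dict.empty, 0)
  let n : Int := PySem.Str.len s
  st.1.values.foldl (fun r q => r + (q.2 - q.1) * (n - q.2)) st.2

-- ===== PRECONDITION & SPEC =====
def Spec_uniqueLetterString (s : String) (out : Int) : Prop := out = uniqueLetterString_alt s
instance (s : String) (out : Int) : Decidable (Spec_uniqueLetterString s out) := by unfold Spec_uniqueLetterString; infer_instance

-- ===== CLAIM (what is proved, stated in full; the proofs are below) =====
def Claim_equal_uniqueLetterString : Prop := ∀ (s : String), Dom_uniqueLetterString s → Spec_uniqueLetterString s (uniqueLetterString s)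

-- ===== LEMMAS AND PROOFS =====

-- occurrence positions of character c in an enumerated prefix
def pvPosns (l : List (Int × Char)) (c : Char) : List Int :=
  (l.filter (fun p => p.2 == c)).map (·.1)

-- B's per-character state transformer: ((secondLast, last), acc) fed one new position
def pvStep (q : (Int × Int) × Int) (p : Int) : (Int × Int) × Int :=
  ((q.1.2, p), q.2 + (q.1.2 - q.1.1) * (p - q.1.2))

def pvGs (ps : List Int) : (Int × Int) × Int := ps.foldl pvStep ((-1, -1), 0)

-- total contribution of a character with occurrence list ps, in a string of length n
def pvContrib (ps : List Int) (n : Int) : Int :=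
  (pvGs ps).2 + ((pvGs ps).1.2 - (pvGs ps).1.1) * (n - (pvGs ps).1.2)

-- sum of (y-x)*(z-y) over consecutive triples of a::b::zs
def pvTriSum : Int → Int → List Int → Int
  | _, _, [] => 0
  | a, b, z :: zs => (b - a) * (z - b) + pvTriSum b z zs

lemma pvPosns_append (l : List (Int × Char)) (p : Int × Char) (c : Char) :
    pvPosns (l ++ [p]) c = pvPosns l c ++ if p.2 == c then [p.1] else [] := by
  rcases p with ⟨i, a⟩
  by_cases h : a = c <;> simp [pvPosns, List.filter_append, h]

lemma pvPosns_nil_of_not_mem (l : List (Int × Char)) (c : Char) (h : c ∉ l.map (·.2)) :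
    pvPosns l c = [] := by
  simp only [pvPosns, List.map_eq_nil_iff, List.filter_eq_nil_iff]
  intro q hq hqc
  exact h (by simpa [(beq_iff_eq.mp hqc)] using List.mem_map_of_mem (f := (·.2)) hq)

lemma pvGs_append (ps : List Int) (x : Int) :
    pvGs (ps ++ [x]) = pvStep (pvGs ps) x := by
  simp [pvGs, List.foldl_append]

-- A's dict-build step collapses to a single modify
lemma pvStepA_eq (d : PySem.Dict Char (List Int)) (p : Int × Char) :
    (let d' := if d.contains p.2 then d else d.insert p.2 []
     d'.modify p.2 [] (· ++ [p.1])) = d.modify p.2 [] (· ++ [p.1]) := by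
  by_cases h : d.contains p.2
  · simp [h]
  · simp only [Bool.not_eq_true] at h
    simp [PySem.Dict.modify, h, PySem.Dict.getD_insert_self, PySem.Dict.getD_of_not_contains,
          PySem.Dict.insert_insert_self]

lemma pvDictA_eq (l : List (Int × Char)) :
    l.foldl (fun d p =>
        let d' := if d.contains p.2 then d else d.insert p.2 []
        d'.modify p.2 [] (· ++ [p.1])) PySem.Dict.empty
      = l.foldl (fun d p => d.modify p.2 [] (· ++ [p.1])) PySem.Dict.empty := by
  apply PySem.List.foldl_congr_mem
  intro d p _
  exact pvStepA_eq d p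

lemma pvGetD_A (l : List (Int × Char)) (c : Char) :
    (l.foldl (fun d p => d.modify p.2 [] (· ++ [p.1])) PySem.Dict.empty).getD c []
      = pvPosns l c := by
  rw [show (List.foldl (fun (d : PySem.Dict Char (List Int)) (p : Int × Char) => d.modify p.2 [] (· ++ [p.1])) PySem.Dict.empty l)
        = (List.foldl (fun d q => d.modify q.1 [] (· ++ [q.2])) PySem.Dict.empty (l.map Prod.swap)) from by
      rw [List.foldl_map]; rfl]
  rw [PySem.Dict.getD_foldl_modify_append]
  simp [pvPosns, PySem.Dict.getD_empty, List.filter_map, Function.comp_def, Prod.swap]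

lemma pvKeys_A (l : List (Int × Char)) :
    (l.foldl (fun d p => d.modify p.2 [] (· ++ [p.1])) PySem.Dict.empty).keys
      = PySem.Set.ofList (l.map (·.2)) := by
  rw [PySem.Dict.keys_foldl_modify_key l (fun p => p.2) [] (fun _ p v => v ++ [p.1])]
  simp [PySem.Set.update_nil_left, PySem.Dict.keys_empty]

lemma pvNodupKeys_A (l : List (Int × Char)) :
    (l.foldl (fun d p => d.modify p.2 [] (· ++ [p.1])) PySem.Dict.empty).keys.Nodup := by
  exact PySem.Dict.nodup_keys_foldl_modify_key l (fun p => p.2) [] (fun _ p v => v ++ [p.1]) _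
    (by simp [PySem.Dict.keys_empty])

-- B's fold: the dict component ignores the accumulator
lemma pvDictB_eq (l : List (Int × Char)) (d0 : PySem.Dict Char (Int × Int)) (r0 : Int) :
    (l.foldl (fun (st : PySem.Dict Char (Int × Int) × Int) p =>
        let q := st.1.getD p.2 (-1, -1)
        (st.1.insert p.2 (q.2, p.1), st.2 + (q.2 - q.1) * (p.1 - q.2))) (d0, r0)).1
      = l.foldl (fun d p => d.insert p.2 ((d.getD p.2 (-1, -1)).2, p.1)) d0 := by
  induction l generalizing d0 r0 with
  | nil => rfl
  | cons p l ih => exact ih _ _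

lemma pvGetD_B (l : List (Int × Char)) (c : Char) :
    (l.foldl (fun d p => d.insert p.2 ((d.getD p.2 (-1, -1)).2, p.1)) PySem.Dict.empty).getD c (-1, -1)
      = (pvGs (pvPosns l c)).1 := by
  induction l using List.reverseRecOn with
  | nil => simp [pvPosns, pvGs, PySem.Dict.getD_empty]
  | append_singleton l p ih =>
    rw [List.foldl_append, List.foldl_cons, List.foldl_nil, PySem.Dict.getD_insert,
        pvPosns_append]
    by_cases h : c = p.2
    · subst h
      rw [if_pos rfl, show (if (p.2 == p.2) = true then [p.1] else []) = [p.1] from by simp,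
          pvGs_append, ih]
      rfl
    · rw [if_neg h, show (if (p.2 == c) = true then [p.1] else []) = [] from by
        simp; intro hh; exact absurd hh.symm h, List.append_nil, ih]

lemma pvKeys_B (l : List (Int × Char)) :
    (l.foldl (fun d p => d.insert p.2 ((d.getD p.2 (-1, -1)).2, p.1)) PySem.Dict.empty).keys
      = PySem.Set.ofList (l.map (·.2)) := by
  rw [PySem.Dict.keys_foldl_insert_key l (fun p => p.2) (fun d p => ((d.getD p.2 (-1, -1)).2, p.1))]
  simp [PySem.Set.update_nil_left, PySem.Dict.keys_empty]

lemma pvNodupKeys_B (l : List (Int × Char)) :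
    (l.foldl (fun d p => d.insert p.2 ((d.getD p.2 (-1, -1)).2, p.1)) PySem.Dict.empty).keys.Nodup := by
  exact PySem.Dict.nodup_keys_foldl_insert_key l (fun p => p.2) (fun d p => ((d.getD p.2 (-1, -1)).2, p.1)) _
    (by simp [PySem.Dict.keys_empty])

-- replacing f by f' at a single member of a nodup list changes the sum by the difference
lemma pvSum_map_update {γ : Type} [DecidableEq γ] (ks : List γ) (hnd : ks.Nodup) (c : γ)
    (hc : c ∈ ks) (f f' : γ → Int) (hne : ∀ x ∈ ks, x ≠ c → f' x = f x) :
    (ks.map f').sum = (ks.map f).sum + (f' c - f c) := by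
  induction ks with
  | nil => simp at hc
  | cons k ks ih =>
    rcases List.mem_cons.mp hc with h | h
    · subst h
      have h2 : ∀ x ∈ ks, f' x = f x := by
        intro x hx
        exact hne x (List.mem_cons_of_mem _ hx) (fun hxc => (List.nodup_cons.mp hnd).1 (hxc ▸ hx))
      rw [List.map_cons, List.map_cons, List.sum_cons, List.sum_cons, List.map_congr_left h2]
      ring
    · have hkc : k ≠ c := fun hkc => (List.nodup_cons.mp hnd).1 (hkc ▸ h)
      rw [List.map_cons, List.map_cons, List.sum_cons, List.sum_cons,
          ih (List.nodup_cons.mp hnd).2 h (fun x hx => hne x (List.mem_cons_of_mem _ hx)),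
          hne k (List.mem_cons_self) hkc]
      ring

lemma pvResB (l : List (Int × Char)) :
    (l.foldl (fun (st : PySem.Dict Char (Int × Int) × Int) p =>
        let q := st.1.getD p.2 (-1, -1)
        (st.1.insert p.2 (q.2, p.1), st.2 + (q.2 - q.1) * (p.1 - q.2))) (PySem.Dict.empty, 0)).2
      = ((PySem.Set.ofList (l.map (·.2))).map (fun c => (pvGs (pvPosns l c)).2)).sum := by
  induction l using List.reverseRecOn with
  | nil => simp [PySem.Set.ofList_nil]
  | append_singleton l p ih =>
    rw [List.foldl_append, List.foldl_cons, List.foldl_nil]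
    rw [List.map_append, show List.map (fun (x : Int × Char) => x.2) [p] = [p.2] from rfl,
        PySem.Set.ofList_append_singleton]
    set K := PySem.Set.ofList (l.map (·.2)) with hK
    have hq : ((l.foldl (fun (st : PySem.Dict Char (Int × Int) × Int) p =>
        let q := st.1.getD p.2 (-1, -1)
        (st.1.insert p.2 (q.2, p.1), st.2 + (q.2 - q.1) * (p.1 - q.2))) (PySem.Dict.empty, 0)).1).getD p.2 (-1,-1)
        = (pvGs (pvPosns l p.2)).1 := by
      rw [pvDictB_eq, pvGetD_B]
    by_cases hm : p.2 ∈ K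
    · rw [PySem.Set.add_of_mem hm]
      rw [pvSum_map_update K (hK ▸ PySem.Set.nodup_ofList _) p.2 hm
            (fun c => (pvGs (pvPosns l c)).2) (fun c => (pvGs (pvPosns (l ++ [p]) c)).2)
            (fun x hx hxp => by
              show (pvGs (pvPosns (l ++ [p]) x)).2 = (pvGs (pvPosns l x)).2
              rw [pvPosns_append, if_neg (by simp; intro hh; exact absurd hh.symm hxp), List.append_nil])]
      rw [pvPosns_append, if_pos (by simp), pvGs_append, ← ih, hq]
      simp [pvStep]
    · rw [PySem.Set.add_of_not_mem hm]
      have hnilp : pvPosns l p.2 = [] :=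
        pvPosns_nil_of_not_mem l p.2 (by simpa [hK, PySem.Set.mem_ofList] using hm)
      rw [List.map_append, List.sum_append,
          List.map_congr_left (fun x hx => by
            show (pvGs (pvPosns (l ++ [p]) x)).2 = (pvGs (pvPosns l x)).2
            rw [pvPosns_append, if_neg (by
              simp
              intro hh
              exact absurd (hh ▸ hx) hm), List.append_nil]),
          ← ih]
      simp [pvPosns_append, pvGs, pvStep, hq, hnilp]

-- xs[i+1] on a cons cell, nonnegative index
lemma pvGetD_cons_succ (x : Int) (ys : List Int) (i d : Int) (h : 0 ≤ i) :
    PySem.List.pyGetD (x :: ys) (i + 1) d = PySem.List.pyGetD ys i d := by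
  simp only [PySem.List.pyGetD, PySem.List.pyGet?, PySem.List.pyIdx?]
  rw [if_pos (by omega : (0:Int) ≤ i + 1), if_pos h]
  by_cases hlt : i < (ys.length : Int)
  · rw [if_pos (by simp; omega), if_pos hlt]
    simp only [Option.bind_some]
    have : (i + 1).toNat = i.toNat + 1 := by omega
    rw [this, List.getElem?_cons_succ]
  · rw [if_neg (by simp; omega), if_neg hlt]
    rfl

lemma pvRange_shift (a b : Int) :
    PySem.List.pyRange (a + 1) (b + 1) 1 = (PySem.List.pyRange a b 1).map (· + 1) := by
  by_cases hab : a < b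
  · have hn : 0 ≤ b - a := by omega
    obtain ⟨k, hk⟩ : ∃ k : Nat, b - a = (k : Int) := ⟨(b - a).toNat, by omega⟩
    induction k generalizing a with
    | zero => omega
    | succ k ih =>
      rw [PySem.List.pyRange_one_cons (show a + 1 < b + 1 by omega),
          PySem.List.pyRange_one_cons hab, List.map_cons]
      by_cases h2 : a + 1 < b
      · rw [ih (a + 1) (by omega) (by omega) (by omega)]
      · rw [PySem.List.pyRange_one_eq_nil (by omega : b ≤ a + 1),
            PySem.List.pyRange_one_eq_nil (by omega : b + 1 ≤ a + 1 + 1)]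
        rfl
  · rw [PySem.List.pyRange_one_eq_nil (by omega), PySem.List.pyRange_one_eq_nil (by omega)]
    rfl

-- index-based inner loop of A = structural triple sum
lemma pvTriF (zs : List Int) : ∀ (x y init : Int),
    (PySem.List.pyRange 1 ((zs.length : Int) + 1) 1).foldl
      (fun r i =>
        r + (PySem.List.pyGetD (x :: y :: zs) i 0 - PySem.List.pyGetD (x :: y :: zs) (i - 1) 0) *
            (PySem.List.pyGetD (x :: y :: zs) (i + 1) 0 - PySem.List.pyGetD (x :: y :: zs) i 0))
      init
    = init + pvTriSum x y zs := by
  induction zs with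
  | nil =>
    intro x y init
    rw [PySem.List.pyRange_one_eq_nil (by simp)]
    simp [pvTriSum]
  | cons z zs ih =>
    intro x y init
    have hlen : ((z :: zs).length : Int) + 1 = ((zs.length : Int) + 1) + 1 := by
      push_cast [List.length_cons]; ring
    rw [hlen, PySem.List.pyRange_one_cons (by omega : (1:Int) < ((zs.length : Int) + 1) + 1),
        List.foldl_cons]
    have g0 : PySem.List.pyGetD (x :: y :: z :: zs) 0 0 = x := PySem.List.pyGetD_zero_cons _ _ _
    have g1 : PySem.List.pyGetD (x :: y :: z :: zs) 1 0 = y := by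
      rw [show (1 : Int) = 0 + 1 by ring, pvGetD_cons_succ _ _ _ _ le_rfl,
          PySem.List.pyGetD_zero_cons]
    have g2 : PySem.List.pyGetD (x :: y :: z :: zs) 2 0 = z := by
      rw [show (2 : Int) = (0 + 1) + 1 by ring, pvGetD_cons_succ _ _ _ _ (by omega),
          pvGetD_cons_succ _ _ _ _ le_rfl, PySem.List.pyGetD_zero_cons]
    rw [show (1 : Int) - 1 = 0 by ring, show (1 : Int) + 1 = 2 by ring, g0, g1, g2]
    have hs := pvRange_shift 1 ((zs.length : Int) + 1)
    norm_num at hs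
    rw [hs, List.foldl_map]
    rw [PySem.List.foldl_congr_mem _ _
        (fun r i =>
          r + (PySem.List.pyGetD (y :: z :: zs) i 0 - PySem.List.pyGetD (y :: z :: zs) (i - 1) 0) *
              (PySem.List.pyGetD (y :: z :: zs) (i + 1) 0 - PySem.List.pyGetD (y :: z :: zs) i 0)) _
        (by
          intro acc i hi
          have h1i : 1 ≤ i := (PySem.List.mem_pyRange_one.mp hi).1
          rw [show i + 1 - 1 = (i - 1) + 1 by ring, pvGetD_cons_succ _ _ _ _ (by omega),
              pvGetD_cons_succ _ _ _ _ (by omega),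
              show i + 1 + 1 = (i + 1) + 1 from rfl,
              pvGetD_cons_succ _ _ _ _ (by omega)])]
    rw [ih y z]
    simp [pvTriSum]
    ring

lemma pvTriSum_gs (ps : List Int) : ∀ (sl l acc n : Int),
    acc + pvTriSum sl l (ps ++ [n])
      = (ps.foldl pvStep ((sl, l), acc)).2
        + ((ps.foldl pvStep ((sl, l), acc)).1.2 - (ps.foldl pvStep ((sl, l), acc)).1.1)
          * (n - (ps.foldl pvStep ((sl, l), acc)).1.2) := by
  induction ps with
  | nil =>
    intro sl l acc n
    simp only [List.nil_append, pvTriSum, List.foldl_nil]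
    ring
  | cons p ps ih =>
    intro sl l acc n
    simp only [List.cons_append, pvTriSum, List.foldl_cons, pvStep]
    rw [← ih]
    ring

-- A's inner loop over the padded list computes pvContrib
lemma pvInnerA (arr0 : List Int) (n init : Int) :
    (PySem.List.pyRange 1 ((([(-1 : Int)] ++ arr0 ++ [n]).length : Int) - 1) 1).foldl
      (fun r i =>
        r + (PySem.List.pyGetD ([(-1 : Int)] ++ arr0 ++ [n]) i 0
              - PySem.List.pyGetD ([(-1 : Int)] ++ arr0 ++ [n]) (i - 1) 0) *
            (PySem.List.pyGetD ([(-1 : Int)] ++ arr0 ++ [n]) (i + 1) 0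
              - PySem.List.pyGetD ([(-1 : Int)] ++ arr0 ++ [n]) i 0))
      init
    = init + pvContrib arr0 n := by
  cases arr0 with
  | nil =>
    rw [show [(-1 : Int)] ++ ([] : List Int) ++ [n] = [-1, n] from rfl,
        show ((([(-1 : Int), n]).length : Int) - 1) = 1 by simp,
        PySem.List.pyRange_one_eq_nil le_rfl]
    simp [pvContrib, pvGs]
  | cons p t =>
    have hl : [(-1 : Int)] ++ (p :: t) ++ [n] = (-1) :: p :: (t ++ [n]) := by simp
    rw [hl, show ((((-1 : Int) :: p :: (t ++ [n])).length : Int) - 1)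
          = (((t ++ [n]).length : Int) + 1) by push_cast [List.length_cons]; ring]
    rw [pvTriF (t ++ [n]) (-1) p init]
    have h0 : pvStep ((-1, -1), 0) p = ((-1, p), 0) := by simp [pvStep]
    rw [pvContrib, pvGs, List.foldl_cons, h0, ← pvTriSum_gs]
    ring

-- ===== VERDICT (by name: the statement is the Claim_ definition above) =====
theorem uniqueLetterString_spec : Claim_equal_uniqueLetterString := by
  intro s _
  unfold Spec_uniqueLetterString uniqueLetterString uniqueLetterString_alt
  dsimp only
  rw [pvDictA_eq, pvDictB_eq]
  rw [PySem.List.foldl_congr_mem _ _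
        (fun res arr0 => res + pvContrib arr0 (PySem.Str.len s)) _
        (fun acc arr0 _ => pvInnerA arr0 (PySem.Str.len s) acc)]
  rw [PySem.List.foldl_add]
  rw [PySem.Dict.values_eq_map_keys _ (pvNodupKeys_A (PySem.List.enumerate s.toList)) []]
  rw [pvKeys_A, List.map_map]
  -- B side
  rw [PySem.List.foldl_add, pvResB]
  rw [PySem.Dict.values_eq_map_keys _ (pvNodupKeys_B (PySem.List.enumerate s.toList)) (-1, -1)]
  rw [pvKeys_B, List.map_map]
  simp only [Function.comp_def, pvGetD_A, pvGetD_B]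
  rw [zero_add, ← PySem.List.sum_map_add_int]
  rfl
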